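-- pv_equiv track=rewrite | github.com/DrHahnchenflugel/Lossless-Stalin-Sort | StalinSort.py | split_stalin_sort
-- ===== SOURCE A (Python) =====
-- def stalin_sort(input_list):
--     """
--         Loops through list, removing any elements out of order
--     """
--     i = 0
--     while i < len(input_list)-1:
--         if input_list[i] > input_list[i+1]:
--             input_list.pop(i+1)
--         else:
--             i += 1
--     return input_list
--
-- def split_stalin_sort(input_list):
--     """
--         Returns 2 lists - kept and stalinized
--     """
--     tooinputtoofurious = []
--     for i in input_list:
--         tooinputtoofurious.append(i)
--
--     kept_list = stalin_sort(input_list)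
--
--     tookepttoofurious = []
--     for i in kept_list:
--         tookepttoofurious.append(i)
--
--     i = 0
--     ii = 0
--     while i < len(tookepttoofurious):
--         while ii < len(tooinputtoofurious):
--             if tookepttoofurious[i] == tooinputtoofurious[ii]:
--                 tooinputtoofurious.pop(ii)
--                 break
--             else:
--                 ii += 1
--         i += 1
--     return [tookepttoofurious, tooinputtoofurious]
-- ===== SOURCE B (Python) =====
-- def split_stalin_sort(input_list):
--     """
--         Returns 2 lists - kept and stalinized
--         (single O(n) pass; mutates input_list to the kept sequence like the original)
--     """
--     kept = []
--     removed = []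
--     for x in input_list:
--         if not kept or x >= kept[-1]:
--             kept.append(x)
--         else:
--             removed.append(x)
--     input_list[:] = kept
--     return [list(kept), removed]
-- ===== Notes on version B (the rewrite author's own statement) =====
-- stated objective: faster
-- what changed: Replaced A's three passes (copy, O(n^2) pop-based stalin_sort, nested value-matching removal loop) with one linear scan that appends each element to kept or removed by comparing it with the last kept value.
import Mathlib
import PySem

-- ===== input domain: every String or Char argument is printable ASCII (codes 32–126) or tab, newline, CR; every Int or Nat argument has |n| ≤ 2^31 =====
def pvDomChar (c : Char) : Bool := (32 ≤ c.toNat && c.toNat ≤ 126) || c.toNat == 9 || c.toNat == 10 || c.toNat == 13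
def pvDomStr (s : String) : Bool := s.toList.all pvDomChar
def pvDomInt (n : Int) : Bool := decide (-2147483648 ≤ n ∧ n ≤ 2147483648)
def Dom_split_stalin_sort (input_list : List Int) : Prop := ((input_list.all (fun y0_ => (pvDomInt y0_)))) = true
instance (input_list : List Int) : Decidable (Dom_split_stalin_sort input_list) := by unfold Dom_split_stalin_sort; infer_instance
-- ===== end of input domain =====

-- B replaces A's three passes with one linear scan keeping x when x >= last kept; equivalence is about
-- the RETURN value only (both Pythons also mutate input_list into the kept sequence; B reproduces that).

-- ===== PORT A =====

-- while loop of stalin_sort: state (input_list, i); indices are in range whenever read (guarded by i < len-1),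
-- so getD/eraseIdx are exact for Python's input_list[i]/pop(i+1)
-- the loop runs at most input_list.length times (the measure length-i strictly decreases),
-- so a fuel of input_list.length makes this structural recursion the exact while loop
def stalinLoop (fuel : Nat) (xs : List Int) (i : Nat) : List Int :=
  match fuel with
  | 0 => xs
  | fuel + 1 =>
      if i < xs.length - 1 then
        if xs.getD (i+1) 0 < xs.getD i 0 then
          stalinLoop fuel (xs.eraseIdx (i+1)) i
        else
          stalinLoop fuel xs (i+1)
      else xs

def stalin_sort (input_list : List Int) : List Int :=
  stalinLoop input_list.length input_list 0

-- inner while loop: scans tooinput from ii for a value equal to v; pops it (break) or runs off the end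
-- the scan advances ii each step, so xs.length - ii steps suffice (fuel supplied at the call)
def pvInner (fuel : Nat) (v : Int) (xs : List Int) (ii : Nat) : List Int × Nat :=
  match fuel with
  | 0 => (xs, ii)
  | fuel + 1 =>
      if ii < xs.length then
        if xs.getD ii 0 = v then (xs.eraseIdx ii, ii)
        else pvInner fuel v xs (ii+1)
      else (xs, ii)

-- outer while loop over tookepttoofurious (ii persists across iterations, as in A)
def pvMatch (kept : List Int) (tooinput : List Int) (ii : Nat) : List Int :=
  match kept with
  | [] => tooinput
  | k :: rest =>
      let p := pvInner (tooinput.length - ii) k tooinput ii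
      pvMatch rest p.1 p.2

def split_stalin_sort (input_list : List Int) : List (List Int) :=
  let tooinput := input_list.foldl (fun acc i => acc ++ [i]) []
  let kept_list := stalin_sort input_list
  let tookept := kept_list.foldl (fun acc i => acc ++ [i]) []
  [tookept, pvMatch tookept tooinput 0]

-- ===== PORT B =====

-- loop body of Source B: append x to kept when kept is empty or x >= kept[-1], else to removed
def bStep (st : List Int × List Int) (x : Int) : List Int × List Int :=
  match st.1.getLast? with
  | none => (st.1 ++ [x], st.2)
  | some l => if l ≤ x then (st.1 ++ [x], st.2) else (st.1, st.2 ++ [x])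

def split_stalin_sort_alt (input_list : List Int) : List (List Int) :=
  let p := input_list.foldl bStep ([], [])
  [p.1, p.2]

-- ===== PRECONDITION & SPEC =====
def Spec_split_stalin_sort (input_list : List Int) (out : List (List Int)) : Prop := out = split_stalin_sort_alt input_list
instance (input_list : List Int) (out : List (List Int)) : Decidable (Spec_split_stalin_sort input_list out) := by unfold Spec_split_stalin_sort; infer_instance

-- ===== CLAIM (what is proved, stated in full; the proofs are below) =====
def Claim_equal_split_stalin_sort : Prop := ∀ (input_list : List Int), Dom_split_stalin_sort input_list → Spec_split_stalin_sort input_list (split_stalin_sort input_list)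

-- ===== LEMMAS AND PROOFS =====

-- reference greedy split: given last kept value l, (kept, removed) of the remaining list
def gPair (l : Int) : List Int → List Int × List Int
  | [] => ([], [])
  | x :: rest =>
      if l ≤ x then
        let p := gPair x rest
        (x :: p.1, p.2)
      else
        let p := gPair l rest
        (p.1, x :: p.2)

lemma gPair_kept_ge (l : Int) (xs : List Int) : ∀ y ∈ (gPair l xs).1, l ≤ y := by
  induction xs generalizing l with
  | nil => simp [gPair]
  | cons x rest ih =>
      intro y hy
      by_cases hx : l ≤ x
      · simp [gPair, hx] at hy
        rcases hy with rfl | hy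
        · exact hx
        · exact le_trans hx (ih x y hy)
      · simp [gPair, hx] at hy
        exact ih l y hy

lemma foldl_copy (xs acc : List Int) : xs.foldl (fun a i => a ++ [i]) acc = acc ++ xs := by
  induction xs generalizing acc with
  | nil => simp
  | cons x rest ih => simp [List.foldl, ih]

lemma gPair_cons_pos (l x : Int) (t : List Int) (h : l ≤ x) :
    gPair l (x :: t) = (x :: (gPair x t).1, (gPair x t).2) := by
  simp [gPair, h]

lemma gPair_cons_neg (l x : Int) (t : List Int) (h : ¬ l ≤ x) :
    gPair l (x :: t) = ((gPair l t).1, x :: (gPair l t).2) := by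
  simp [gPair, h]

lemma stalin_eq (fuel : Nat) (xs : List Int) (i : Nat) (h : i < xs.length)
    (hf : xs.length - i ≤ fuel + 1) :
    stalinLoop fuel xs i = xs.take (i+1) ++ (gPair (xs.getD i 0) (xs.drop (i+1))).1 := by
  induction fuel generalizing xs i with
  | zero =>
      have hdrop : xs.drop (i+1) = [] := List.drop_eq_nil_of_le (by omega)
      have htk : xs.take (i+1) = xs := List.take_of_length_le (by omega)
      rw [stalinLoop, hdrop, htk]
      simp [gPair]
  | succ fuel ih =>
      by_cases hlt : i < xs.length - 1
      · by_cases hcmp : xs.getD (i+1) 0 < xs.getD i 0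
        · -- pop branch: xs[i] > xs[i+1]
          have hi1 : i + 1 < xs.length := by omega
          have hide : xs.eraseIdx (i+1) = xs.take (i+1) ++ xs.drop (i+2) :=
            List.eraseIdx_eq_take_drop_succ ..
          have hlen : (xs.eraseIdx (i+1)).length = xs.length - 1 := by
            simp [List.length_eraseIdx, hi1]
          have hieq : i < (xs.eraseIdx (i+1)).length := by omega
          have hf' : (xs.eraseIdx (i+1)).length - i ≤ fuel + 1 := by omega
          rw [stalinLoop, if_pos hlt, if_pos hcmp, ih _ _ hieq hf']
          have htk : (xs.eraseIdx (i+1)).take (i+1) = xs.take (i+1) := by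
            rw [hide, List.take_append_of_le_length (by simp; omega)]
            simp [Nat.min_eq_left (by omega : i + 1 ≤ xs.length)]
          have hgd : (xs.eraseIdx (i+1)).getD i 0 = xs.getD i 0 := by
            rw [hide, List.getD_append _ _ _ _ (by simp; omega)]
            rw [List.getD_eq_getElem _ _ (by simp; omega), List.getD_eq_getElem _ _ (by omega)]
            simp [List.getElem_take]
          have hdr : (xs.eraseIdx (i+1)).drop (i+1) = xs.drop (i+2) := by
            rw [hide, List.drop_append_of_le_length (by simp; omega)]
            simp
          rw [htk, hgd, hdr]
          have hdrop : xs.drop (i+1) = xs[i+1] :: xs.drop (i+2) :=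
            List.drop_eq_getElem_cons hi1
          have hx : ¬ xs.getD i 0 ≤ xs[i+1] := by
            rw [List.getD_eq_getElem _ _ hi1] at hcmp
            omega
          rw [hdrop, gPair_cons_neg _ _ _ hx]
        · -- keep branch: xs[i] <= xs[i+1]
          have hi1 : i + 1 < xs.length := by omega
          have hf' : xs.length - (i+1) ≤ fuel + 1 := by omega
          rw [stalinLoop, if_pos hlt, if_neg hcmp, ih xs (i+1) hi1 hf']
          have hdrop : xs.drop (i+1) = xs[i+1] :: xs.drop (i+2) :=
            List.drop_eq_getElem_cons hi1
          have hx : xs.getD i 0 ≤ xs[i+1] := by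
            rw [List.getD_eq_getElem _ _ hi1] at hcmp
            omega
          have htk : xs.take (i+1+1) = xs.take (i+1) ++ [xs[i+1]] := by
            rw [List.take_add_one]
            simp [List.getElem?_eq_getElem hi1]
          rw [hdrop, htk, List.getD_eq_getElem _ _ hi1, gPair_cons_pos _ _ _ hx,
            List.append_assoc]
          rfl
      · -- loop exit: i = len - 1
        have hdrop : xs.drop (i+1) = [] := List.drop_eq_nil_of_le (by omega)
        have htk : xs.take (i+1) = xs := List.take_of_length_le (by omega)
        rw [stalinLoop, if_neg hlt, hdrop, htk]
        simp [gPair]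

lemma pvInner_found (fuel : Nat) (P rest : List Int) (v : Int) :
    pvInner (fuel+1) v (P ++ v :: rest) P.length = (P ++ rest, P.length) := by
  have hlen : P.length < (P ++ v :: rest).length := by simp
  have hgd : (P ++ v :: rest).getD P.length 0 = v := by
    rw [List.getD_append_right _ _ _ _ (le_refl _)]
    simp
  have her : (P ++ v :: rest).eraseIdx P.length = P ++ rest := by
    rw [List.eraseIdx_append_of_length_le (le_refl _)]
    simp
  rw [pvInner, if_pos hlen, if_pos hgd, her]

lemma pvInner_skip (fuel : Nat) (P rest : List Int) (v x : Int) (hne : x ≠ v) :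
    pvInner (fuel+1) v (P ++ x :: rest) P.length
      = pvInner fuel v ((P ++ [x]) ++ rest) (P ++ [x]).length := by
  have hlen : P.length < (P ++ x :: rest).length := by simp
  have hgd : (P ++ x :: rest).getD P.length 0 = x := by
    rw [List.getD_append_right _ _ _ _ (le_refl _)]
    simp
  rw [pvInner, if_pos hlen, if_neg (by rw [hgd]; exact hne)]
  have hl : P ++ x :: rest = (P ++ [x]) ++ rest := by simp
  have hn : P.length + 1 = (P ++ [x]).length := by simp
  rw [hl, hn]

lemma match_eq (xs : List Int) (l : Int) (P : List Int) :
    pvMatch (gPair l xs).1 (P ++ xs) P.length = P ++ (gPair l xs).2 := by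
  induction xs generalizing l P with
  | nil => simp [gPair, pvMatch]
  | cons x rest ih =>
      have hf1 : (P ++ x :: rest).length - P.length = rest.length + 1 := by simp
      by_cases hx : l ≤ x
      · simp only [gPair, if_pos hx]
        rw [pvMatch, hf1]
        simp only [pvInner_found rest.length P rest x]
        exact ih x P
      · simp only [gPair, if_neg hx]
        have key : pvMatch (gPair l rest).1 (P ++ x :: rest) P.length
            = pvMatch (gPair l rest).1 ((P ++ [x]) ++ rest) (P ++ [x]).length := by
          cases hK : (gPair l rest).1 with
          | nil =>
              have hrw : P ++ x :: rest = (P ++ [x]) ++ rest := by simp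
              rw [hrw]; rfl
          | cons k K' =>
              have hk : l ≤ k := by
                apply gPair_kept_ge l rest
                rw [hK]; exact List.mem_cons_self ..
              have hxk : x ≠ k := by omega
              have hf2 : ((P ++ [x]) ++ rest).length - (P ++ [x]).length = rest.length := by
                simp
                omega
              rw [pvMatch, pvMatch, hf1, hf2, pvInner_skip rest.length P rest k x hxk]
        rw [key, ih l (P ++ [x])]
        simp

lemma alt_fold (xs k r : List Int) (l : Int) (hk : k.getLast? = some l) :
    List.foldl bStep (k, r) xs = (k ++ (gPair l xs).1, r ++ (gPair l xs).2) := by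
  induction xs generalizing k r l with
  | nil => simp [gPair]
  | cons x rest ih =>
      by_cases hx : l ≤ x
      · have : bStep (k, r) x = (k ++ [x], r) := by simp [bStep, hk, hx]
        simp only [List.foldl, this, gPair, hx]
        rw [ih (k ++ [x]) r x (by simp)]
        simp
      · have : bStep (k, r) x = (k, r ++ [x]) := by simp [bStep, hk, hx]
        simp only [List.foldl, this, gPair, hx]
        rw [ih k (r ++ [x]) l hk]
        simp

-- ===== VERDICT (by name: the statement is the Claim_ definition above) =====
theorem split_stalin_sort_spec : Claim_equal_split_stalin_sort := by
  intro xs _hdom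
  unfold Spec_split_stalin_sort
  cases xs with
  | nil =>
      simp [split_stalin_sort, split_stalin_sort_alt, stalin_sort, stalinLoop, pvMatch]
  | cons x rest =>
      have hs : stalin_sort (x :: rest) = x :: (gPair x rest).1 := by
        have := stalin_eq (x :: rest).length (x :: rest) 0 (by simp) (Nat.le_succ _)
        simpa [stalin_sort] using this
      have hm : pvMatch (x :: (gPair x rest).1) (x :: rest) 0 = (gPair x rest).2 := by
        have := match_eq (x :: rest) x ([] : List Int)
        simpa [gPair] using this
      have hb : List.foldl bStep ([], []) (x :: rest)
          = (x :: (gPair x rest).1, (gPair x rest).2) := by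
        have h0 : bStep (([] : List Int), ([] : List Int)) x = ([x], []) := by
          simp [bStep]
        simp only [List.foldl, h0]
        rw [alt_fold rest [x] [] x (by simp)]
        simp
      simp only [split_stalin_sort, split_stalin_sort_alt, foldl_copy, List.nil_append, hs, hm, hb]
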